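-- pv_equiv track=rewrite | github.com/tum-i4/localizing-android-malicious-behaviors | localizationAssoc.py | findMalBehaviorInRule
-- ===== SOURCE A (Python) =====
-- def findMalBehaviorInRule(rule, malBehavior):
-- 	count = 0
-- 	index = [-1]*len(malBehavior)
-- 	for i in range(len(malBehavior)):
-- 		# check if all methods from the malicious behavior are found in the rule
-- 		if malBehavior[i] in rule:
-- 			count = count+1
-- 			index[i] = rule.index(malBehavior[i])
-- 	return count, index
-- ===== SOURCE B (Python) =====
-- def findMalBehaviorInRule(rule, malBehavior):
-- 	index = [-1]*len(malBehavior)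
-- 	pending = {}
-- 	for i, m in enumerate(malBehavior):
-- 		pending.setdefault(m, []).append(i)
-- 	count = 0
-- 	for ri, x in enumerate(rule):
-- 		slots = pending.pop(x, None)
-- 		if slots is not None:
-- 			for i in slots:
-- 				index[i] = ri
-- 				count += 1
-- 	return count, index
-- ===== Notes on version B (the rewrite author's own statement) =====
-- stated objective: faster
-- what changed: B inverts the traversal: it groups malBehavior into a value-to-slot-list map, then makes a single pass over rule, popping each matched value and writing the current rule position into all its slots in place; A instead scans rule twice per malBehavior element ('in' + .index).
import Mathlib
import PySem

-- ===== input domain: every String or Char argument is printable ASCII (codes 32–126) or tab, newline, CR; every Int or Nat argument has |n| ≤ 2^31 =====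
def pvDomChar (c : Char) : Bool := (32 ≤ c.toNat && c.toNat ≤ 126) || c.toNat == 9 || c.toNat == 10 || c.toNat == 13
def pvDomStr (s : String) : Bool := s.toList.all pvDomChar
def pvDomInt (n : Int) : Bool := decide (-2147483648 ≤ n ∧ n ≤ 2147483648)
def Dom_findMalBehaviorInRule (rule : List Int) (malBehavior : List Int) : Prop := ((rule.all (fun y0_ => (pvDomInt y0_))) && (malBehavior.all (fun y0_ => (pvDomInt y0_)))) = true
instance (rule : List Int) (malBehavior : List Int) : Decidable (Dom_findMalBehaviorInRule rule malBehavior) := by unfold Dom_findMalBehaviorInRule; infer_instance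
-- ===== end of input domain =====

-- B inverts the traversal: it groups malBehavior into a value → slot-list map, then scans
-- rule ONCE, popping each matched value and writing the rule position into all its slots;
-- A scans rule twice per malBehavior element ('in' + .index).

-- ===== PORT A =====
def findMalBehaviorInRule (rule : List Int) (malBehavior : List Int) : Int × List Int :=
  (PySem.List.pyRange 0 malBehavior.length 1).foldl
    (fun st i =>
      match PySem.List.pyGet? malBehavior i with
      | none => st
      | some m =>
        if m ∈ rule then
          match PySem.List.index? rule m with
          | none => st
          | some j => (st.1 + 1, st.2.set i.toNat (j : Int))
        else st)
    (0, List.replicate malBehavior.length (-1))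

-- ===== PORT B =====
-- pending = {}; for i, m in enumerate(malBehavior): pending.setdefault(m, []).append(i)
def fmrPending (malBehavior : List Int) : PySem.Dict Int (List Int) :=
  (PySem.List.enumerate malBehavior).foldl
    (fun d p => d.modify p.2 [] (fun l => l ++ [p.1])) PySem.Dict.empty

-- one iteration of 'for ri, x in enumerate(rule)': slots = pending.pop(x, None); if slots is not None: …
def fmrStep (st : Int × List Int × PySem.Dict Int (List Int)) (p : Int × Int) :
    Int × List Int × PySem.Dict Int (List Int) :=
  match st.2.2.get? p.2 with
  | none => st
  | some slots =>
    let ci := slots.foldl (fun q i => (q.1 + 1, q.2.set i.toNat p.1)) (st.1, st.2.1)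
    (ci.1, ci.2, st.2.2.erase p.2)

def findMalBehaviorInRule_alt (rule : List Int) (malBehavior : List Int) : Int × List Int :=
  let st := (PySem.List.enumerate rule).foldl fmrStep
    (0, List.replicate malBehavior.length (-1), fmrPending malBehavior)
  (st.1, st.2.1)

-- ===== PRECONDITION & SPEC =====
def Spec_findMalBehaviorInRule (rule : List Int) (malBehavior : List Int) (out : Int × List Int) : Prop := out = findMalBehaviorInRule_alt rule malBehavior
instance (rule : List Int) (malBehavior : List Int) (out : Int × List Int) : Decidable (Spec_findMalBehaviorInRule rule malBehavior out) := by unfold Spec_findMalBehaviorInRule; infer_instance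

-- ===== CLAIM (what is proved, stated in full; the proofs are below) =====
def Claim_equal_findMalBehaviorInRule : Prop := ∀ (rule : List Int) (malBehavior : List Int), Dom_findMalBehaviorInRule rule malBehavior → Spec_findMalBehaviorInRule rule malBehavior (findMalBehaviorInRule rule malBehavior)

-- ===== LEMMAS AND PROOFS =====

-- the common value: s + first index of m in suf, or -1
def fmrUpd (suf : List Int) (s : Int) (m : Int) : Int :=
  match PySem.List.index? suf m with
  | some j => s + (j : Int)
  | none => -1

def fmrF (rule : List Int) (m : Int) : Int := fmrUpd rule 0 m

theorem fmrF_neg_one_iff (rule : List Int) (m : Int) :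
    fmrF rule m = -1 ↔ m ∉ rule := by
  unfold fmrF fmrUpd
  cases hfind : PySem.List.index? rule m with
  | none =>
    simp [(PySem.List.index?_eq_none_iff rule m).mp hfind]
  | some j =>
    have hm : m ∈ rule := (PySem.List.index?_isSome_iff rule m).mp (by rw [hfind]; rfl)
    simp only [hm, not_true_eq_false, iff_false]
    omega

-- ===== A-side: A's loop computes (countP (∈ rule), map (fmrF rule)) =====
theorem fmrA_loop (rule : List Int) :
    ∀ (suf pre : List Int) (c : Int) (L : List Int), L.length = pre.length →
    (PySem.List.pyRange (pre.length : Int) ((pre ++ suf).length : Int) 1).foldl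
      (fun st i =>
        match PySem.List.pyGet? (pre ++ suf) i with
        | none => st
        | some m =>
          if m ∈ rule then
            match PySem.List.index? rule m with
            | none => st
            | some j => (st.1 + 1, st.2.set i.toNat (j : Int))
          else st)
      (c, L ++ List.replicate suf.length (-1))
    = (c + (suf.countP (fun x => decide (x ∈ rule)) : Int), L ++ suf.map (fmrF rule)) := by
  intro suf
  induction suf with
  | nil =>
    intro pre c L hL
    simp [PySem.List.pyRange]
  | cons m rest ih =>
    intro pre c L hL
    have hlt : (pre.length : Int) < ((pre ++ m :: rest).length : Int) := by
      simp
    rw [PySem.List.pyRange_one_cons hlt]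
    simp only [List.foldl_cons]
    have hget : PySem.List.pyGet? (pre ++ m :: rest) (pre.length : Int) = some m :=
      PySem.List.pyGet?_append_length pre rest m
    simp only [hget]
    have hrep : List.replicate (m :: rest).length (-1 : Int) = -1 :: List.replicate rest.length (-1) := by
      simp [List.replicate]
    have hkey : ∀ (v : Int),
        (L ++ -1 :: List.replicate rest.length (-1)).set ((pre.length : Int)).toNat v
        = (L ++ [v]) ++ List.replicate rest.length (-1) := by
      intro v
      have htn : ((pre.length : Int)).toNat = L.length := by omega
      rw [htn, List.set_append_right _ _ (by omega)]
      simp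
    by_cases hm : m ∈ rule
    · cases hfind : PySem.List.index? rule m with
      | none => exact absurd ((PySem.List.index?_eq_none_iff rule m).mp hfind) (by simpa using hm)
      | some j =>
        simp only [if_pos hm, hrep]
        rw [hkey]
        have hstep := ih (pre ++ [m]) (c + 1) (L ++ [(j : Int)]) (by simp [hL])
        simp only [List.append_assoc, List.cons_append, List.nil_append] at hstep ⊢
        have hlen : ((pre ++ [m]).length : Int) = (pre.length : Int) + 1 := by simp
        rw [hlen] at hstep
        rw [hstep]
        have hf : fmrF rule m = (j : Int) := by unfold fmrF fmrUpd; rw [hfind]; simp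
        simp [hf, hm]
        omega
    · simp only [if_neg hm, hrep]
      have hstep := ih (pre ++ [m]) c (L ++ [(-1 : Int)]) (by simp [hL])
      have hlen : ((pre ++ [m]).length : Int) = (pre.length : Int) + 1 := by simp
      rw [hlen] at hstep
      simp only [List.append_assoc, List.cons_append, List.nil_append] at hstep ⊢
      rw [hstep]
      have hf : fmrF rule m = -1 := (fmrF_neg_one_iff rule m).mpr hm
      simp [hf, hm]

-- ===== B-side =====

-- erase ∘ get? (PySem.Dict.erase is a filter on the items list; PYSEM.md lists no erase lemma)
theorem fmrGet?_erase (d : PySem.Dict Int (List Int)) (k k' : Int) :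
    (d.erase k).get? k' = if k' = k then none else d.get? k' := by
  obtain ⟨l⟩ := d
  induction l with
  | nil => simp [PySem.Dict.erase, PySem.Dict.get?]
  | cons p rest ih =>
    simp only [PySem.Dict.erase, PySem.Dict.get?, List.filter_cons] at *
    by_cases h2 : k' = k
    · subst h2
      by_cases h1 : p.1 = k'
      · simpa [h1] using ih
      · simpa [h1] using ih
    · by_cases h1 : p.1 = k
      · have hpk' : ¬ p.1 = k' := by rw [h1]; exact fun h => h2 h.symm
        rw [List.find?_cons_of_neg (by simp [hpk'])]
        simpa [h1, hpk', h2] using ih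
      · by_cases h3 : p.1 = k'
        · simp [h3, h2]
        · simpa [h1, h3, h2] using ih

-- the slot list of m: positions of m in malBehavior, offset by s
def fmrSlots (mb : List Int) (s : Int) (m : Int) : List Int :=
  match mb with
  | [] => []
  | x :: xs => (if x = m then [s] else []) ++ fmrSlots xs (s + 1) m

theorem fmrSlots_filter (m : Int) :
    ∀ (mb : List Int) (s : Int),
    (((PySem.List.enumerate mb s).map Prod.swap).filter
        (fun p => p.1 == m)).map (fun p => p.2) = fmrSlots mb s m := by
  intro mb
  induction mb with
  | nil => intro s; simp [PySem.List.enumerate_nil, fmrSlots]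
  | cons x xs ih =>
    intro s
    rw [PySem.List.enumerate_cons]
    by_cases h : x = m
    · simp [fmrSlots, h, Prod.swap, ih]
    · simp [fmrSlots, h, Prod.swap, ih]

theorem fmrPending_get? (mb : List Int) (m : Int) :
    (fmrPending mb).get? m =
    if m ∈ mb then some (fmrSlots mb 0 m) else none := by
  have hkeys : (fmrPending mb).contains m = decide (m ∈ mb) := by
    unfold fmrPending
    rw [PySem.Dict.contains_eq_decide_mem_keys, PySem.Dict.keys_foldl_modify_key]
    simp [PySem.Dict.keys_empty, PySem.Set.update_nil_left, PySem.Set.mem_ofList,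
          PySem.List.map_snd_enumerate]
  have hgetD : (fmrPending mb).getD m [] = fmrSlots mb 0 m := by
    have hswap : ((PySem.List.enumerate mb).map Prod.swap).foldl
          (fun d q => d.modify q.1 [] (fun l => l ++ [q.2])) PySem.Dict.empty
        = (PySem.List.enumerate mb).foldl
          (fun d p => d.modify p.2 [] (fun l => l ++ [p.1])) PySem.Dict.empty := by
      rw [List.foldl_map]
      simp [Prod.swap]
    unfold fmrPending
    rw [← hswap, PySem.Dict.getD_foldl_modify_append]
    simp [PySem.Dict.getD_empty, fmrSlots_filter]
  by_cases hm : m ∈ mb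
  · have hc : (fmrPending mb).contains m = true := by simp [hkeys, hm]
    cases hg : (fmrPending mb).get? m with
    | none =>
      rw [PySem.Dict.contains_eq_isSome_get?, hg] at hc
      simp at hc
    | some v =>
      have hv : (fmrPending mb).getD m [] = v := by
        rw [PySem.Dict.getD_eq_get?_getD, hg]
        rfl
      rw [hgetD] at hv
      simp [hm, hv]
  · have hc : (fmrPending mb).contains m = false := by simp [hkeys, hm]
    simp [hm, (PySem.Dict.get?_eq_none_iff_contains _ _).mpr hc]

-- the inner loop 'for i in slots: index[i] = v; count += 1' over the slots of m
theorem fmrSet_loop (v : Int) (m : Int) :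
    ∀ (mb : List Int) (L : List Int) (g : Int → Int) (c : Int),
    (fmrSlots mb (L.length : Int) m).foldl
      (fun q i => (q.1 + 1, q.2.set i.toNat v)) (c, L ++ mb.map g)
    = (c + (mb.count m : Int), L ++ mb.map (fun y => if y = m then v else g y)) := by
  intro mb
  induction mb with
  | nil => simp [fmrSlots]
  | cons x xs ih =>
    intro L g c
    by_cases h : x = m
    · simp only [fmrSlots, if_pos h, List.singleton_append, List.foldl_cons]
      have hset : (L ++ (x :: xs).map g).set ((L.length : Int)).toNat v
          = (L ++ [v]) ++ xs.map g := by
        have htn : ((L.length : Int)).toNat = L.length := by omega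
        rw [htn, List.map_cons, List.set_append_right _ _ (by omega)]
        simp
      rw [hset]
      have := ih (L ++ [v]) g (c + 1)
      have hlen : ((L ++ [v]).length : Int) = (L.length : Int) + 1 := by simp
      rw [hlen] at this
      rw [this]
      simp only [Prod.mk.injEq]
      refine ⟨by simp [h]; omega, by simp [h, List.append_assoc]⟩
    · simp only [fmrSlots, if_neg h, List.nil_append]
      have hhd : L ++ (x :: xs).map g = (L ++ [g x]) ++ xs.map g := by simp
      rw [hhd]
      have := ih (L ++ [g x]) g c
      have hlen : ((L ++ [g x]).length : Int) = (L.length : Int) + 1 := by simp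
      rw [hlen] at this
      rw [this]
      have hcnt : (x :: xs).count m = xs.count m := by
        simp [h]
      simp [hcnt, h, List.append_assoc]

-- counting bookkeeping when x is popped
theorem fmrCount_split (x : Int) (xs : List Int) (g : Int → Int) (s : Int)
    (hgx : g x = -1) (hs : s ≠ -1) :
    ∀ mb : List Int,
    mb.countP (fun m => decide (g m = -1 ∧ m ∈ x :: xs))
    = mb.count x + mb.countP (fun m => decide ((if m = x then s else g m) = -1 ∧ m ∈ xs)) := by
  intro mb
  induction mb with
  | nil => simp
  | cons y ys ih =>
    simp only [List.countP_cons, List.count_cons, ih]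
    by_cases h : y = x
    · simp [h, hgx, hs]
      omega
    · simp [h, List.mem_cons]
      omega

-- the main loop over rule, with the pending dict tied to the marking function g
theorem fmrB_loop (mb : List Int) :
    ∀ (suf : List Int) (s : Int), 0 ≤ s →
    ∀ (c : Int) (g : Int → Int) (pend : PySem.Dict Int (List Int)),
    (∀ m, pend.get? m = if m ∈ mb ∧ g m = -1 then some (fmrSlots mb 0 m) else none) →
    ((PySem.List.enumerate suf s).foldl fmrStep (c, mb.map g, pend)).1
      = c + (mb.countP (fun m => decide (g m = -1 ∧ m ∈ suf)) : Int)
    ∧ ((PySem.List.enumerate suf s).foldl fmrStep (c, mb.map g, pend)).2.1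
      = mb.map (fun m => if g m = -1 then fmrUpd suf s m else g m) := by
  intro suf
  induction suf with
  | nil =>
    intro s hs c g pend hpend
    constructor
    · simp [PySem.List.enumerate_nil]
    · simp only [PySem.List.enumerate_nil, List.foldl_nil]
      refine (List.map_congr_left ?_).symm
      intro m _
      by_cases h : g m = -1 <;> simp [h, fmrUpd, PySem.List.index?_eq_idxOf?]
  | cons x xs ih =>
    intro s hs c g pend hpend
    rw [PySem.List.enumerate_cons]
    simp only [List.foldl_cons]
    by_cases hx : x ∈ mb ∧ g x = -1
    · -- x is popped: all its slots are written with s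
      have hstep : fmrStep (c, mb.map g, pend) (s, x)
          = (c + (mb.count x : Int),
             mb.map (fun y => if y = x then s else g y),
             pend.erase x) := by
        have hfold := fmrSet_loop s x mb [] g c
        simp only [List.nil_append, List.length_nil, Nat.cast_zero] at hfold
        unfold fmrStep
        rw [hpend x]
        simp only [if_pos hx]
        simp [hfold]
      rw [hstep]
      have hg' : ∀ m, (pend.erase x).get? m
          = if m ∈ mb ∧ (if m = x then s else g m) = -1
            then some (fmrSlots mb 0 m) else none := by
        intro m
        rw [fmrGet?_erase]
        by_cases hm : m = x
        · simp [hm]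
          omega
        · simp only [if_neg hm, hpend m]
      obtain ⟨hc, hi⟩ := ih (s + 1) (by omega) (c + (mb.count x : Int))
        (fun y => if y = x then s else g y) (pend.erase x) hg'
      constructor
      · rw [hc, fmrCount_split x xs g s hx.2 (by omega) mb]
        push_cast
        ring
      · rw [hi]
        refine List.map_congr_left ?_
        intro m _
        by_cases hm : m = x
        · subst hm
          simp only [hx.2]
          have : fmrUpd (m :: xs) s m = s := by
            unfold fmrUpd
            rw [PySem.List.index?_cons_self]
            simp
          rw [this]
          have hsne : ¬ (s = -1) := by omega
          simp [hsne]
        · simp only [if_neg hm]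
          by_cases hg : g m = -1
          · simp only [if_pos hg]
            unfold fmrUpd
            rw [PySem.List.index?_cons_of_ne xs (fun h => hm h.symm)]
            cases PySem.List.index? xs m with
            | none => simp
            | some j => simp; omega
          · simp [hg]
    · -- x not pending: the state is unchanged
      have hstep : fmrStep (c, mb.map g, pend) (s, x) = (c, mb.map g, pend) := by
        unfold fmrStep
        simp [hpend x, hx]
      rw [hstep]
      obtain ⟨hc, hi⟩ := ih (s + 1) (by omega) c g pend hpend
      constructor
      · rw [hc]
        congr 2
        refine List.countP_congr ?_
        intro m hm
        by_cases hg : g m = -1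
        · have hmx : m ≠ x := fun h => hx ⟨h ▸ hm, h ▸ hg⟩
          simp [hg, List.mem_cons, hmx]
        · simp [hg]
      · rw [hi]
        refine List.map_congr_left ?_
        intro m hm
        by_cases hg : g m = -1
        · have hmx : m ≠ x := fun h => hx ⟨h ▸ hm, h ▸ hg⟩
          simp only [if_pos hg]
          unfold fmrUpd
          rw [PySem.List.index?_cons_of_ne xs (fun h => hmx h.symm)]
          cases PySem.List.index? xs m with
          | none => simp
          | some j => simp; omega
        · simp [hg]

-- ===== VERDICT (by name: the statement is the Claim_ definition above) =====
theorem findMalBehaviorInRule_spec : Claim_equal_findMalBehaviorInRule := by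
  intro rule mb _
  unfold Spec_findMalBehaviorInRule findMalBehaviorInRule findMalBehaviorInRule_alt
  have hA := fmrA_loop rule mb [] 0 [] rfl
  simp only [List.nil_append, List.length_nil, Nat.cast_zero] at hA
  rw [hA]
  have hrep : List.replicate mb.length (-1 : Int) = mb.map (fun _ => (-1 : Int)) := by
    simp
  have hpend0 : ∀ m, (fmrPending mb).get? m
      = if m ∈ mb ∧ (fun _ : Int => (-1 : Int)) m = -1
        then some (fmrSlots mb 0 m) else none := by
    intro m
    rw [fmrPending_get?]
    simp
  obtain ⟨hc, hi⟩ := fmrB_loop mb rule 0 (by omega) 0 (fun _ => (-1 : Int))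
    (fmrPending mb) hpend0
  rw [hrep]
  simp only [hc, hi]
  simp only [Prod.mk.injEq]
  constructor
  · simp
  · refine List.map_congr_left ?_
    intro m _
    simp [fmrF]
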